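-- pv_equiv track=rewrite | github.com/leepbioinfo/rotifer | lib/rotifer/devel/alpha/gian_func.py | find_next_non_existing
-- ===== SOURCE A (Python) =====
-- def find_next_non_existing(lst):
--     result = []
--     seen = set(lst)  # Store the original elements in a set for quick lookup
--
--     for num in lst:
--         next_num = num + 1  # Start with the next integer
--         # Increment until we find a unique number not in the original list
--         while next_num in seen:
--             next_num += 1
--         result.append(next_num)
--
--     return result
-- ===== SOURCE B (Python) =====
-- def find_next_non_existing(lst):
--     # Map each distinct value, taken in decreasing order, to the end of its
--     # consecutive run plus one: nxt[v] = nxt.get(v+1, v+1) (v+1 already done).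
--     nxt = {}
--     for v in sorted(set(lst), reverse=True):
--         nxt[v] = nxt.get(v + 1, v + 1)
--     return [nxt[num] for num in lst]
-- ===== Notes on version B (the rewrite author's own statement) =====
-- stated objective: alternative
-- what changed: Replaces the per-element while-scan through the seen-set by one descending pass over the sorted distinct values that builds a next-free dictionary (nxt[v] = nxt.get(v+1, v+1)), then a single lookup per element; it trades A's per-element scanning for one sort plus O(1) lookups.
import Mathlib
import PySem

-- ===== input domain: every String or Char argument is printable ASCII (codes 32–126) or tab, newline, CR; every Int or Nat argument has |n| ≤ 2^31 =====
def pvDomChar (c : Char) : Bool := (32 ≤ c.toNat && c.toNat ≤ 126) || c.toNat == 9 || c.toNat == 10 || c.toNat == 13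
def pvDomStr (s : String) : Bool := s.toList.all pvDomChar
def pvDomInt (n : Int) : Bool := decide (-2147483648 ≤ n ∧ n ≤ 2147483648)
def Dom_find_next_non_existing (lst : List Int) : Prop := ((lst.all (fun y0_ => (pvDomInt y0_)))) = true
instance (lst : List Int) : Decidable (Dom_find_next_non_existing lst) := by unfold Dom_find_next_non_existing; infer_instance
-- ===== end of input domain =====

-- B replaces A's per-element while-scan by one descending pass over the sorted
-- distinct values building a next-free dictionary; same return value, proved below.

-- ===== PORT A =====
-- termination helper for the while loop: members ≥ x strictly shrink when x ∈ seen
theorem pvFilterGe_lt (seen : List Int) (x : Int) (hx : x ∈ seen) :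
    (seen.filter (fun y => decide (x + 1 ≤ y))).length
      < (seen.filter (fun y => decide (x ≤ y))).length := by
  induction seen with
  | nil => cases hx
  | cons a t ih =>
    have hmono : (t.filter (fun y => decide (x + 1 ≤ y))).length
        ≤ (t.filter (fun y => decide (x ≤ y))).length := by
      refine List.Sublist.length_le (List.monotone_filter_right t ?_)
      intro y hy
      simp only [decide_eq_true_eq] at hy ⊢
      omega
    simp only [List.filter_cons]
    rcases List.mem_cons.mp hx with h | h
    · have e1 : decide (x + 1 ≤ a) = false := by
        simp only [decide_eq_false_iff_not]; omega
      have e2 : decide (x ≤ a) = true := by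
        simp only [decide_eq_true_eq]; omega
      simp only [e1, e2, Bool.false_eq_true, if_false, if_true, List.length_cons]
      omega
    · have hlt := ih h
      by_cases h1 : x + 1 ≤ a
      · have e1 : decide (x + 1 ≤ a) = true := by
          simp only [decide_eq_true_eq]; omega
        have e2 : decide (x ≤ a) = true := by
          simp only [decide_eq_true_eq]; omega
        simp only [e1, e2, if_true, List.length_cons]
        omega
      · have e1 : decide (x + 1 ≤ a) = false := by
          simp only [decide_eq_false_iff_not]; omega
        by_cases h2 : x ≤ a
        · have e2 : decide (x ≤ a) = true := by
            simp only [decide_eq_true_eq]; omega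
          simp only [e1, e2, Bool.false_eq_true, if_false, if_true, List.length_cons]
          omega
        · have e2 : decide (x ≤ a) = false := by
            simp only [decide_eq_false_iff_not]; omega
          simp only [e1, e2, Bool.false_eq_true, if_false]
          omega

-- the 'while next_num in seen: next_num += 1' loop of A
def pvWhile (seen : List Int) (next_num : Int) : Int :=
  if h : next_num ∈ seen then pvWhile seen (next_num + 1) else next_num
termination_by (seen.filter (fun y => decide (next_num ≤ y))).length
decreasing_by exact pvFilterGe_lt seen next_num h

def find_next_non_existing (lst : List Int) : List Int :=
  let seen := PySem.Set.ofList lst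
  lst.foldl (fun result num => result ++ [pvWhile seen (num + 1)]) []

-- ===== PORT B =====
def find_next_non_existing_alt (lst : List Int) : List Int :=
  let nxt := (PySem.List.sorted (PySem.Set.ofList lst) (fun x => x) true).foldl
    (fun (d : PySem.Dict Int Int) v => d.insert v ((d.get? (v + 1)).getD (v + 1)))
    PySem.Dict.empty
  -- nxt[num]: the key is always present (num ∈ set(lst)); .getD 0 is the Option unwrap
  lst.map (fun num => (nxt.get? num).getD 0)

-- ===== PRECONDITION & SPEC =====
def Spec_find_next_non_existing (lst : List Int) (out : List Int) : Prop := out = find_next_non_existing_alt lst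
instance (lst : List Int) (out : List Int) : Decidable (Spec_find_next_non_existing lst out) := by unfold Spec_find_next_non_existing; infer_instance

-- ===== CLAIM (what is proved, stated in full; the proofs are below) =====
def Claim_equal_find_next_non_existing : Prop := ∀ (lst : List Int), Dom_find_next_non_existing lst → Spec_find_next_non_existing lst (find_next_non_existing lst)

-- ===== LEMMAS AND PROOFS =====

theorem pvWhile_unfold (seen : List Int) (x : Int) :
    pvWhile seen x = if x ∈ seen then pvWhile seen (x + 1) else x := by
  rw [pvWhile]; split <;> simp_all

-- dictionary-building invariant: folding B's step over a strictly descending list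
-- of members of S extends a correct partial next-free table to a correct one
theorem pvDict_inv (S : List Int) (l : List Int) (d : PySem.Dict Int Int)
    (hsort : l.Pairwise (· > ·)) (hsub : ∀ v ∈ l, v ∈ S)
    (hdom : ∀ u, ((d.get? u).isSome ↔ (u ∈ S ∧ u ∉ l)))
    (hval : ∀ u w, d.get? u = some w → w = pvWhile S (u + 1)) :
    let d' := l.foldl (fun (d : PySem.Dict Int Int) v =>
      d.insert v ((d.get? (v + 1)).getD (v + 1))) d
    (∀ u, ((d'.get? u).isSome ↔ u ∈ S)) ∧
    (∀ u w, d'.get? u = some w → w = pvWhile S (u + 1)) := by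
  induction l generalizing d with
  | nil =>
    refine ⟨fun u => ?_, hval⟩
    simpa using hdom u
  | cons v t ih =>
    rcases List.pairwise_cons.mp hsort with ⟨hgt, hsortt⟩
    have hvS : v ∈ S := hsub v (List.mem_cons_self ..)
    have hv1t : v + 1 ∉ v :: t := by
      intro h
      rcases List.mem_cons.mp h with h | h
      · omega
      · have := hgt _ h; omega
    set val := ((d.get? (v + 1)).getD (v + 1)) with hvaldef
    have hval' : val = pvWhile S (v + 1) := by
      rw [pvWhile_unfold]
      by_cases hmem : v + 1 ∈ S
      · rw [if_pos hmem]
        have hs : (d.get? (v + 1)).isSome := (hdom (v + 1)).mpr ⟨hmem, hv1t⟩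
        rcases Option.isSome_iff_exists.mp hs with ⟨w, hw⟩
        have hww := hval _ _ hw
        rw [hvaldef, hw]
        simpa using hww
      · have hn : d.get? (v + 1) = none := by
          by_contra hc
          exact hmem ((hdom (v + 1)).mp (Option.isSome_iff_ne_none.mpr hc)).1
        rw [if_neg hmem, hvaldef, hn]
        rfl
    simp only [List.foldl_cons]
    apply ih (d := d.insert v val) hsortt (fun x hx => hsub x (List.mem_cons_of_mem _ hx))
    · intro u
      rw [PySem.Dict.get?_insert]
      split
      · subst u
        simp only [Option.isSome_some, true_iff]
        exact ⟨hvS, fun hc => by have := hgt _ hc; omega⟩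
      · rw [hdom u]
        constructor
        · rintro ⟨h1, h2⟩
          exact ⟨h1, fun hc => h2 (List.mem_cons_of_mem _ hc)⟩
        · rintro ⟨h1, h2⟩
          refine ⟨h1, fun hc => ?_⟩
          rcases List.mem_cons.mp hc with hc | hc
          · exact absurd hc (by assumption)
          · exact h2 hc
    · intro u w hw
      rw [PySem.Dict.get?_insert] at hw
      split at hw
      · subst u
        cases hw
        exact hval'
      · exact hval _ _ hw

-- ===== VERDICT (by name: the statement is the Claim_ definition above) =====
theorem find_next_non_existing_spec : Claim_equal_find_next_non_existing := by
  intro lst _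
  unfold Spec_find_next_non_existing find_next_non_existing find_next_non_existing_alt
  set S := PySem.Set.ofList lst with hS
  rw [PySem.List.foldl_append_singleton_eq_map]
  have hnodup : (PySem.List.sorted S (fun x => x) true).Nodup :=
    (PySem.List.sorted_perm S (fun x => x) true).nodup_iff.mpr (PySem.Set.nodup_ofList lst)
  have hsort : (PySem.List.sorted S (fun x => x) true).Pairwise (· > ·) := by
    have h1 := PySem.List.sorted_pairwise_rev (xs := S) (key := fun x => x)
    have h2 := hnodup
    rw [List.Nodup] at h2
    refine (h1.and h2).imp ?_
    rintro a b ⟨hle, hne⟩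
    exact lt_of_le_of_ne hle (fun e => hne e.symm)
  have hinv := pvDict_inv S (PySem.List.sorted S (fun x => x) true) PySem.Dict.empty
    hsort
    (fun v hv => (PySem.List.mem_sorted _ _ _ _).mp hv)
    (fun u => by
      constructor
      · intro h
        rw [PySem.Dict.get?_empty] at h
        simp at h
      · rintro ⟨h1, h2⟩
        exact absurd ((PySem.List.mem_sorted _ _ _ _).mpr h1) h2)
    (fun u w hw => by rw [PySem.Dict.get?_empty] at hw; cases hw)
  refine List.map_congr_left ?_
  intro num hnum
  have hmem : num ∈ S := (PySem.Set.mem_ofList _ _).mpr hnum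
  rcases Option.isSome_iff_exists.mp ((hinv.1 num).mpr hmem) with ⟨w, hw⟩
  rw [hw]
  exact (hinv.2 num w hw).symm
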